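-- pv_equiv track=rewrite | github.com/SamSDK/AI_MiniP_2 | skeleton-tictactoe.py | consecutivePlus
-- ===== SOURCE A (Python) =====
-- def consecutivePlus(line, symbol):
--     counter = 0
--     consecutiveList = []
--     for char in line:
--         if char == symbol or char == '.':
--             counter += 1
--         else:
--             consecutiveList.append(counter)
--             counter = 0
--     consecutiveList.append(counter)
--     return consecutiveList
-- ===== SOURCE B (Python) =====
-- def consecutivePlus(line, symbol):
--     marker = ''.join('x' if c == symbol or c == '.' else '|' for c in line)
--     return [len(seg) for seg in marker.split('|')]
-- ===== Notes on version B (the rewrite author's own statement) =====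
-- stated objective: alternative
-- what changed: Replaces A's running-counter accumulator loop with a transform-then-split pipeline: map each char to a filler/separator marker, split on the separator, return the segment lengths.
import Mathlib
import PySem

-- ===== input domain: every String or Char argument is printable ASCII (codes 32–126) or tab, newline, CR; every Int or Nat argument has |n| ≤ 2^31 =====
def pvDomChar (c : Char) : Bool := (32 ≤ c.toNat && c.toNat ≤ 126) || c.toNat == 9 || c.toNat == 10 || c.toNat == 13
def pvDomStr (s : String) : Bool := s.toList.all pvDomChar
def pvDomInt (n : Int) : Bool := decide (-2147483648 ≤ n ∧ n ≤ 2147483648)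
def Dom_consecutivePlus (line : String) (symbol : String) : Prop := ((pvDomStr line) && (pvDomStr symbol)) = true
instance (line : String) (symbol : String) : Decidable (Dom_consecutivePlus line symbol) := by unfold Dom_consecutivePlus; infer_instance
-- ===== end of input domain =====

-- B replaces A's running-counter loop by a map-to-markers / split / lengths pipeline (objective: alternative decomposition, same cost).

-- ===== PORT A =====
-- A: running counter, appended to the accumulator on each non-matching char, final append.
def consecutivePlus (line : String) (symbol : String) : List Int :=
  let st := line.toList.foldl
    (fun (p : Int × List Int) char =>
      if String.mk [char] = symbol ∨ char = '.' then (p.1 + 1, p.2)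
      else (0, p.2 ++ [p.1]))
    ((0 : Int), ([] : List Int))
  st.2 ++ [st.1]

-- ===== PORT B =====
-- B: build a marker list ('x' for matching chars, '|' otherwise), split on '|', take segment lengths.
-- List.splitOn is exact for Python's str.split with a single-char separator: it keeps empty
-- segments and returns [[]] on the empty string, just as ''.split('|') == [''].
def consecutivePlus_alt (line : String) (symbol : String) : List Int :=
  let marker := line.toList.map
    (fun c => if String.mk [c] = symbol ∨ c = '.' then 'x' else '|')
  (marker.splitOn '|').map (fun seg => (seg.length : Int))

-- ===== PRECONDITION & SPEC =====
def Spec_consecutivePlus (line : String) (symbol : String) (out : List Int) : Prop := out = consecutivePlus_alt line symbol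
instance (line : String) (symbol : String) (out : List Int) : Decidable (Spec_consecutivePlus line symbol out) := by unfold Spec_consecutivePlus; infer_instance

-- ===== CLAIM (what is proved, stated in full; the proofs are below) =====
def Claim_equal_consecutivePlus : Prop := ∀ (line : String) (symbol : String), Dom_consecutivePlus line symbol → Spec_consecutivePlus line symbol (consecutivePlus line symbol)

-- ===== LEMMAS AND PROOFS =====

-- add n to the first run length (the run in progress when the loop state is (n, acc))
def cpAddHead : Int → List Int → List Int
  | n, [] => [n]
  | n, h :: t => (n + h) :: t

lemma cp_loop (symbol : String) (l : List Char) (cnt : Int) (acc : List Int) :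
    (l.foldl
        (fun (p : Int × List Int) char =>
          if String.mk [char] = symbol ∨ char = '.' then (p.1 + 1, p.2)
          else (0, p.2 ++ [p.1])) (cnt, acc)).2 ++
    [(l.foldl
        (fun (p : Int × List Int) char =>
          if String.mk [char] = symbol ∨ char = '.' then (p.1 + 1, p.2)
          else (0, p.2 ++ [p.1])) (cnt, acc)).1]
    = acc ++ cpAddHead cnt
        (((l.map (fun c => if String.mk [c] = symbol ∨ c = '.' then 'x' else '|')).splitOn '|').map
          (fun seg => (seg.length : Int))) := by
  induction l generalizing cnt acc with
  | nil => simp [List.splitOn, cpAddHead]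
  | cons c l ih =>
    by_cases h : String.mk [c] = symbol ∨ c = '.'
    · obtain ⟨hd, tl, hsplit⟩ := List.exists_cons_of_ne_nil
        (List.splitOnP_ne_nil (· == '|')
          (l.map (fun c => if String.mk [c] = symbol ∨ c = '.' then 'x' else '|')))
      simp only [List.foldl_cons, List.map_cons, if_pos h, List.splitOn, List.splitOnP_cons]
      rw [ih (cnt + 1) acc]
      simp [List.splitOn, hsplit, cpAddHead]
      ring
    · obtain ⟨hd, tl, hsplit⟩ := List.exists_cons_of_ne_nil
        (List.splitOnP_ne_nil (· == '|')
          (l.map (fun c => if String.mk [c] = symbol ∨ c = '.' then 'x' else '|')))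
      simp only [List.foldl_cons, List.map_cons, if_neg h, List.splitOn, List.splitOnP_cons]
      rw [ih 0 (acc ++ [cnt])]
      simp [List.splitOn, hsplit, cpAddHead]

-- ===== VERDICT (by name: the statement is the Claim_ definition above) =====
theorem consecutivePlus_spec : Claim_equal_consecutivePlus := by
  intro line symbol _
  show consecutivePlus line symbol = consecutivePlus_alt line symbol
  simp only [consecutivePlus, consecutivePlus_alt]
  rw [cp_loop symbol line.toList 0 []]
  obtain ⟨hd, tl, hsplit⟩ := List.exists_cons_of_ne_nil
    (List.splitOnP_ne_nil (· == '|')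
      (line.toList.map (fun c => if String.mk [c] = symbol ∨ c = '.' then 'x' else '|')))
  simp only [List.splitOn]
  simp [List.splitOn, hsplit, cpAddHead]
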